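-- pv_equiv track=rewrite | github.com/davatk/advent-of-code-2019 | day-04/day-04.py | good_password
-- ===== SOURCE A (Python) =====
-- def good_password(password: int) -> bool:
--     digits = [int(c) for c in str(password)]
--     never_decreases = True
--     has_double = False
--     for digit, next_digit in zip(digits, digits[1:]):
--         if digit == next_digit:
--             has_double = True
--         if next_digit < digit:
--             never_decreases = False
--     return has_double and never_decreases
-- ===== SOURCE B (Python) =====
-- def good_password(password: int) -> bool:
--     s = str(password)
--     return any(a == b for a, b in zip(s, s[1:])) and sorted(s) == list(s)
-- ===== Notes on version B (the rewrite author's own statement) =====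
-- stated objective: idiomatic
-- what changed: B drops the per-digit int conversion and the explicit monotonicity flag: it checks non-decreasing digits by comparing the string with its sorted copy and the double with any() over zipped adjacent characters.
import Mathlib
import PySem

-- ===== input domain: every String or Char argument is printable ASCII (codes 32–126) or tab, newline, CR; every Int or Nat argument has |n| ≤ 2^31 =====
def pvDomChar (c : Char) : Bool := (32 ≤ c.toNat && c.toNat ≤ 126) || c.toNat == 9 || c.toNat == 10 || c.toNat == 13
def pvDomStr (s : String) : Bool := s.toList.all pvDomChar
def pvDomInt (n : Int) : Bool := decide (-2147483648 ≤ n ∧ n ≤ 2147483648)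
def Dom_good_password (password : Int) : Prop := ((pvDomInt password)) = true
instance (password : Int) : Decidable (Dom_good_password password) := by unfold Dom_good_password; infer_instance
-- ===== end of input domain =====

-- B checks non-decreasing digits by comparing the digit string to its sorted copy
-- instead of A's per-digit int conversion and explicit monotonicity flag (objective: idiomatic).

-- ===== PORT A =====
-- int(c) on a single character: PySem.Int.ofChars? [c]; none (= ValueError, on the '-' of a
-- negative password) is excluded by Pre_good_password, so the .getD 0 default is never reached there.
def good_password (password : Int) : Bool :=
  let digits : List Int :=
    (PySem.Int.toChars password).map (fun c => (PySem.Int.ofChars? [c]).getD 0)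
  let r := (digits.zip (PySem.List.slice digits (some 1) none)).foldl
    (fun (st : Bool × Bool) p =>
      -- st = (never_decreases, has_double); the two ifs of the loop body
      (if p.2 < p.1 then false else st.1, if p.1 == p.2 then true else st.2))
    (true, false)
  r.2 && r.1

-- ===== PORT B =====
def good_password_alt (password : Int) : Bool :=
  let s := PySem.Int.toChars password
  ((s.zip (PySem.List.slice s (some 1) none)).any (fun p => p.1 == p.2))
    && (PySem.List.sorted s (fun c => c) false == s)

-- ===== PRECONDITION & SPEC =====
-- Pre_ excludes exactly the negative passwords, on which A raises ValueError (int('-')).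
def Pre_good_password (password : Int) : Prop := 0 ≤ password
instance (password : Int) : Decidable (Pre_good_password password) := by unfold Pre_good_password; infer_instance
def pvWitness_good_password : Int := 122345

def Spec_good_password (password : Int) (out : Bool) : Prop := out = good_password_alt password
instance (password : Int) (out : Bool) : Decidable (Spec_good_password password out) := by unfold Spec_good_password; infer_instance

-- ===== CLAIM (what is proved, stated in full; the proofs are below) =====
def Claim_equal_good_password : Prop := ∀ (password : Int), Dom_good_password password → Pre_good_password password → Spec_good_password password (good_password password)

-- ===== LEMMAS AND PROOFS =====

def digitList : List Char := ['0','1','2','3','4','5','6','7','8','9']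

def dval (c : Char) : Int := (PySem.Int.ofChars? [c]).getD 0

lemma toDigitsCore_mem (fuel n : Nat) (ds : List Char) (h : ∀ c ∈ ds, c ∈ digitList) :
    ∀ c ∈ Nat.toDigitsCore 10 fuel n ds, c ∈ digitList := by
  induction fuel generalizing n ds with
  | zero => simpa [Nat.toDigitsCore]
  | succ f ih =>
    have hcons : ∀ c ∈ (n % 10).digitChar :: ds, c ∈ digitList := by
      intro c hc
      rcases List.mem_cons.mp hc with rfl | hc
      · have h10 : n % 10 < 10 := Nat.mod_lt _ (by omega)
        interval_cases hm : (n % 10) <;> simp [Nat.digitChar, digitList]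
      · exact h c hc
    simp only [Nat.toDigitsCore]
    split
    · exact hcons
    · exact ih _ _ hcons

lemma toChars_mem (p : Int) (hp : 0 ≤ p) : ∀ c ∈ PySem.Int.toChars p, c ∈ digitList := by
  simp only [PySem.Int.toChars, if_neg (by omega : ¬ p < 0)]
  exact toDigitsCore_mem _ _ _ (by simp)

set_option maxRecDepth 2048 in
lemma dval_cmp : ∀ c ∈ digitList, ∀ d ∈ digitList,
    ((dval c == dval d) = (c == d)) ∧ ((decide (dval d < dval c)) = decide (d < c)) := by
  intro c hc d hd
  unfold digitList at hc hd
  fin_cases hc <;> fin_cases hd <;> exact ⟨by decide, by decide⟩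

-- A's loop: the final state in terms of all / any over the traversed pairs
lemma fold_char (ps : List (Int × Int)) (nd hd : Bool) :
    ps.foldl (fun (st : Bool × Bool) p =>
        (if p.2 < p.1 then false else st.1, if p.1 == p.2 then true else st.2)) (nd, hd)
      = (nd && ps.all (fun p => !decide (p.2 < p.1)), hd || ps.any (fun p => p.1 == p.2)) := by
  induction ps generalizing nd hd with
  | nil => simp
  | cons q t ih =>
    simp only [List.foldl_cons, List.all_cons, List.any_cons, ih]
    by_cases h1 : q.2 < q.1 <;> by_cases h2 : q.1 == q.2 <;> simp [h1, h2]

lemma zip_tail_all (s : List Char) :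
    ((s.zip s.tail).all (fun q => !decide (q.2 < q.1)) = true) ↔ s.IsChain (· ≤ ·) := by
  induction s with
  | nil => simp
  | cons a t ih =>
    cases t with
    | nil => simp
    | cons b u =>
      rw [List.tail_cons, List.zip_cons_cons, List.all_cons, Bool.and_eq_true,
        List.isChain_cons_cons, ← ih, List.tail_cons]
      constructor
      · rintro ⟨h1, h2⟩; exact ⟨by simpa [not_lt] using h1, h2⟩
      · rintro ⟨h1, h2⟩; exact ⟨by simpa [not_lt] using h1, h2⟩

lemma sorted_eq_iff (s : List Char) :
    (PySem.List.sorted s (fun c => c) false = s) ↔ s.Pairwise (· ≤ ·) := by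
  constructor
  · intro h
    have := PySem.List.sorted_pairwise s (fun c => c)
    rw [h] at this
    exact this
  · intro h
    exact PySem.List.sorted_eq_self_of_pairwise s (fun c => c) h

lemma map_pairs_cmp (ps : List (Char × Char))
    (h : ∀ q ∈ ps, q.1 ∈ digitList ∧ q.2 ∈ digitList) :
    ((ps.map (fun q => (dval q.1, dval q.2))).any (fun q => q.1 == q.2)
        = ps.any (fun q => q.1 == q.2))
    ∧ ((ps.map (fun q => (dval q.1, dval q.2))).all (fun q => !decide (q.2 < q.1))
        = ps.all (fun q => !decide (q.2 < q.1))) := by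
  induction ps with
  | nil => simp
  | cons q t ih =>
    have hq := h q (List.mem_cons_self)
    have ht := ih (fun r hr => h r (List.mem_cons_of_mem _ hr))
    obtain ⟨he, hl⟩ := dval_cmp q.1 hq.1 q.2 hq.2
    obtain ⟨he', hl'⟩ := dval_cmp q.2 hq.2 q.1 hq.1
    simp only [List.map_cons, List.any_cons, List.all_cons, ht.1, ht.2, he, hl]
    exact ⟨trivial, trivial⟩

-- ===== VERDICT (by name: the statement is the Claim_ definition above) =====
theorem good_password_spec : Claim_equal_good_password := by
  intro p _ hp
  unfold Spec_good_password good_password good_password_alt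
  simp only [PySem.List.slice_from_one]
  set s := PySem.Int.toChars p with hs
  have hmem := toChars_mem p hp
  have hpairs : ∀ q ∈ s.zip s.tail, q.1 ∈ digitList ∧ q.2 ∈ digitList := by
    intro q hq
    obtain ⟨h1, h2⟩ := List.of_mem_zip hq
    exact ⟨hmem _ h1, hmem _ (List.mem_of_mem_tail h2)⟩
  have hzipmap : (s.map dval).zip ((s.map dval).tail)
      = (s.zip s.tail).map (fun q => (dval q.1, dval q.2)) := by
    rw [← List.map_tail, List.zip_map]
    rfl
  show (_ && _) = _
  rw [show (fun c => (PySem.Int.ofChars? [c]).getD 0) = dval from rfl, hzipmap, fold_char]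
  obtain ⟨ha, hl⟩ := map_pairs_cmp (s.zip s.tail) hpairs
  rw [ha, hl]
  have hsort : (PySem.List.sorted s (fun c => c) false == s)
      = ((s.zip s.tail).all fun q => !decide (q.2 < q.1)) := by
    rw [Bool.eq_iff_iff, beq_iff_eq, sorted_eq_iff, zip_tail_all, List.isChain_iff_pairwise]
  rw [hsort]
  simp
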